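-- pv_equiv track=rewrite | github.com/AbhinavSingh111/HackerRank-DS | stack_mid_ele_del_using_rec.py | del_ele
-- ===== SOURCE A (Python) =====
-- def del_ele(stk , k):
--     if k==1:
--         stk.pop()
--         return stk
--     temp = stk.pop()
--     del_ele(stk,k-1)
--     stk.append(temp)
--     return stk
-- ===== SOURCE B (Python) =====
-- def del_ele(stk, k):
--     # k counts from the top: the target sits at index len(stk)-k from the bottom.
--     stk.pop(len(stk) - k)
--     return stk
-- ===== Notes on version B (the rewrite author's own statement) =====
-- stated objective: simpler
-- what changed: Replaces the O(k) recursion that pops and re-pushes the top k-1 elements with a single indexed pop at len(stk)-k.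
import Mathlib
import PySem

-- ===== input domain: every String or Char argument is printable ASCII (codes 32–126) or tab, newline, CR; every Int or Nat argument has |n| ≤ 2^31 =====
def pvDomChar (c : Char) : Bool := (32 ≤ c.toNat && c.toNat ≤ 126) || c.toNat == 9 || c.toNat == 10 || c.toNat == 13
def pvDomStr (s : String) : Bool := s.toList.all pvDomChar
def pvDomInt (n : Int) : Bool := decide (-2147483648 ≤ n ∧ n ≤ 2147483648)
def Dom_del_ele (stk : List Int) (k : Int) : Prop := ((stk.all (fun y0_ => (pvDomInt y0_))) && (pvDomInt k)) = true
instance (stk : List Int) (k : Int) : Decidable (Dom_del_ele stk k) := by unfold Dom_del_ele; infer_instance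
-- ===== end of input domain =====

-- B replaces A's recursion (pop top, recurse, re-push) by one indexed pop at len(stk)-k: simpler,
-- no recursion. Both Pythons mutate stk in place and return it; the equivalence proved is about the
-- RETURN value (within Pre_ the final mutated lists coincide anyway).

-- ===== PORT A =====
-- A: if k==1 pop the top; else pop the top into temp, recurse with k-1, push temp back.
-- 'stk.pop()' on an empty list raises IndexError in Python (the 'none' branch); excluded by Pre_.
def del_ele (stk : List Int) (k : Int) : List Int :=
  if k == 1 then stk.dropLast
  else
    match h : stk.getLast? with
    | none => []   -- IndexError: pop from empty list (outside Pre_)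
    | some temp => del_ele stk.dropLast (k - 1) ++ [temp]
termination_by stk.length
decreasing_by
  have hne : stk ≠ [] := by intro hn; rw [hn] at h; simp at h
  have hl : 0 < stk.length := List.length_pos_iff.mpr hne
  simp [List.length_dropLast]
  omega

-- ===== PORT B =====
-- B: stk.pop(len(stk) - k); return stk.  pop? none = IndexError (outside Pre_).
def del_ele_alt (stk : List Int) (k : Int) : List Int :=
  match PySem.List.pop? stk ((stk.length : Int) - k) with
  | some r => r.2
  | none => []   -- IndexError (outside Pre_)

-- ===== PRECONDITION & SPEC =====
-- Pre_ : exactly the inputs where A returns normally; for k < 1 or k > len(stk) A's recursion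
-- empties the stack and raises IndexError on pop from empty.
def Pre_del_ele (stk : List Int) (k : Int) : Prop := 1 ≤ k ∧ k ≤ (stk.length : Int)
instance (stk : List Int) (k : Int) : Decidable (Pre_del_ele stk k) := by unfold Pre_del_ele; infer_instance
def pvWitness_del_ele : List Int × Int := ([3, 1, 4, 1, 5], 2)

def Spec_del_ele (stk : List Int) (k : Int) (out : List Int) : Prop := out = del_ele_alt stk k
instance (stk : List Int) (k : Int) (out : List Int) : Decidable (Spec_del_ele stk k out) := by unfold Spec_del_ele; infer_instance

-- ===== CLAIM (what is proved, stated in full; the proofs are below) =====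
def Claim_equal_del_ele : Prop := ∀ (stk : List Int) (k : Int), Dom_del_ele stk k → Pre_del_ele stk k → Spec_del_ele stk k (del_ele stk k)

-- ===== LEMMAS AND PROOFS =====

-- A computes eraseIdx at index len - k (characterisation of the recursion), by induction on k.
theorem del_ele_eq_eraseIdx_aux (n : Nat) : ∀ (stk : List Int) (k : Int),
    k.toNat = n + 1 → 1 ≤ k → k ≤ (stk.length : Int) →
    del_ele stk k = stk.eraseIdx (stk.length - k.toNat) := by
  induction n with
  | zero =>
      intro stk k hn h1 h2
      have hk1 : k = 1 := by omega
      subst hk1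
      rw [del_ele]
      simp [List.dropLast_eq_eraseIdx]
  | succ m ih =>
      intro stk k hn h1 h2
      have hk2 : 2 ≤ k := by omega
      rw [del_ele, if_neg (by simp; omega : ¬ (k == 1) = true)]
      split
      · next heq =>
          rw [List.getLast?_eq_none_iff] at heq
          subst heq
          simp at h2
          omega
      · next temp heq =>
          obtain ⟨l', rfl⟩ := List.getLast?_eq_some_iff.mp heq
          have hlen : (l' ++ [temp]).length = l'.length + 1 := by simp
          have ih' := ih l' (k - 1) (by omega) (by omega) (by rw [hlen] at h2; push_cast at h2 ⊢; omega)
          simp only [List.dropLast_concat]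
          rw [ih']
          have hidx : (l' ++ [temp]).length - k.toNat < l'.length := by
            rw [hlen] at h2 ⊢; omega
          rw [List.eraseIdx_append_of_lt_length hidx]
          have hix : l'.length - (k - 1).toNat = (l' ++ [temp]).length - k.toNat := by
            simp only [List.length_append, List.length_cons, List.length_nil] at h2 ⊢
            omega
          rw [hix]

theorem del_ele_eq_eraseIdx (stk : List Int) (k : Int)
    (h1 : 1 ≤ k) (h2 : k ≤ (stk.length : Int)) :
    del_ele stk k = stk.eraseIdx (stk.length - k.toNat) :=
  del_ele_eq_eraseIdx_aux (k.toNat - 1) stk k (by omega) h1 h2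

-- ===== VERDICT (by name: the statement is the Claim_ definition above) =====
theorem del_ele_spec : Claim_equal_del_ele := by
  intro stk k _ hpre
  obtain ⟨h1, h2⟩ := hpre
  unfold Spec_del_ele del_ele_alt
  have hnn : (0 : Int) ≤ (stk.length : Int) - k := by omega
  have hcast : (stk.length : Int) - k = ((stk.length - k.toNat : Nat) : Int) := by omega
  have hlt : stk.length - k.toNat < stk.length := by omega
  rw [hcast]
  simp only [PySem.List.pop?_natCast _ _ hlt]
  exact del_ele_eq_eraseIdx stk k h1 h2
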